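-- pv_equiv track=rewrite | github.com/Glimone/dopsei_manager | scripts/data_process.py | validate_atribuicao
-- ===== SOURCE A (Python) =====
-- def validate_atribuicao(lote):
--     atribuition_map = {
--         "Cirilo": [1, 16, 22, 28],
--         "Luiz": [13, 21, 24, 25, 30],
--         "Manuel": [6, 9, 11, 12, 19, 20, 31],
--         "Thaís": [3, 7, 23, 27, 29],
--     }
--
--     try:
--         lote_num = int(lote)
--     except ValueError:
--         return "Lote inválido"
--
--     for tecnico, lotes in atribuition_map.items():
--         if lote_num in lotes:
--             return tecnico
--
--     return None
-- ===== SOURCE B (Python) =====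
-- # Table-driven: a dense positional code string indexed by the lote number,
-- # decoded to the technician's full name; no map scan at all.
-- _CODE = ".C.T..MT.M.MML..C..MMLCTLL.TCTLM"
-- _NAMES = {"C": "Cirilo", "L": "Luiz", "M": "Manuel", "T": "Thaís"}
--
--
-- def validate_atribuicao(lote):
--     try:
--         lote_num = int(lote)
--     except ValueError:
--         return "Lote inválido"
--     if 0 <= lote_num < len(_CODE):
--         c = _CODE[lote_num]
--         if c != ".":
--             return _NAMES[c]
--     return None
-- ===== Notes on version B (the rewrite author's own statement) =====
-- stated objective: alternative
-- what changed: Replaces the scan over the technician->lotes map with a table-driven decode: a dense 32-char positional code string is indexed directly by the lote number and the letter decoded to the technician's name.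
import Mathlib
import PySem

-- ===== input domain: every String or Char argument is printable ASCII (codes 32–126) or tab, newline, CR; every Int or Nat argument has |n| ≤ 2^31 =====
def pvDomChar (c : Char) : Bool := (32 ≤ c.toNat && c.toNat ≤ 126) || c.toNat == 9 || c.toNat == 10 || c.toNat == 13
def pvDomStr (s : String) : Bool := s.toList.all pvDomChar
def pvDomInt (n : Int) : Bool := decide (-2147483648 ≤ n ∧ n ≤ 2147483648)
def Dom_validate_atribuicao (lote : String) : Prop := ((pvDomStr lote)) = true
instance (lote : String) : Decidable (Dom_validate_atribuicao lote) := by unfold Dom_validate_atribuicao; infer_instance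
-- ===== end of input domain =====

-- B replaces A's scan over the technician→lotes map with a table-driven decode:
-- a dense positional code string indexed by the lote number (objective: alternative).

-- ===== PORT A =====
def pvMapA : List (String × List Int) :=
  [("Cirilo", [1, 16, 22, 28]),
   ("Luiz", [13, 21, 24, 25, 30]),
   ("Manuel", [6, 9, 11, 12, 19, 20, 31]),
   ("Thaís", [3, 7, 23, 27, 29])]

def pvLoopA (n : Int) : List (String × List Int) → Option String
  | [] => none
  | (t, ls) :: rest => if ls.contains n then some t else pvLoopA n rest

def validate_atribuicao (lote : String) : Option String :=
  match PySem.Int.ofStr? lote with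
  | none => some "Lote inválido"
  | some n => pvLoopA n pvMapA

-- ===== PORT B =====
def pvCodeB : String := ".C.T..MT.M.MML..C..MMLCTLL.TCTLM"

def pvNamesB : PySem.Dict Char String :=
  PySem.Dict.ofList [('C', "Cirilo"), ('L', "Luiz"), ('M', "Manuel"), ('T', "Thaís")]

def validate_atribuicao_alt (lote : String) : Option String :=
  match PySem.Int.ofStr? lote with
  | none => some "Lote inválido"
  | some n =>
    if 0 ≤ n ∧ n < (PySem.Str.len pvCodeB : Int) then
      match PySem.Str.pyGet? pvCodeB n with
      | some c => if c ≠ '.' then pvNamesB.get? c else none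
      | none => none
    else none

-- ===== PRECONDITION & SPEC =====
def Spec_validate_atribuicao (lote : String) (out : Option String) : Prop := out = validate_atribuicao_alt lote
instance (lote : String) (out : Option String) : Decidable (Spec_validate_atribuicao lote out) := by unfold Spec_validate_atribuicao; infer_instance

-- ===== CLAIM =====
def Claim_equal_validate_atribuicao : Prop := ∀ (lote : String), Dom_validate_atribuicao lote → Spec_validate_atribuicao lote (validate_atribuicao lote)

-- ===== LEMMAS AND PROOFS =====
set_option maxRecDepth 8000 in
lemma pvBody_eq (n : Int) :
    pvLoopA n pvMapA =
      (if 0 ≤ n ∧ n < (PySem.Str.len pvCodeB : Int) then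
        match PySem.Str.pyGet? pvCodeB n with
        | some c => if c ≠ '.' then pvNamesB.get? c else none
        | none => none
      else none) := by
  by_cases h : 0 ≤ n ∧ n < (PySem.Str.len pvCodeB : Int)
  · have hlen : (PySem.Str.len pvCodeB : Int) = 32 := by decide
    rw [hlen] at h
    obtain ⟨h1, h2⟩ := h
    interval_cases n <;> decide
  · rw [if_neg h]
    have h32 : ¬ (0 ≤ n ∧ n < 32) := by
      have : (PySem.Str.len pvCodeB : Int) = 32 := by decide
      rw [this] at h; exact h
    simp only [pvLoopA, pvMapA,
      List.elem_eq_mem, List.mem_cons, List.not_mem_nil, decide_eq_true_eq, or_false]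
    split_ifs <;> first | rfl | omega

-- ===== VERDICT =====
theorem validate_atribuicao_spec : Claim_equal_validate_atribuicao := by
  intro lote _
  unfold Spec_validate_atribuicao validate_atribuicao validate_atribuicao_alt
  cases PySem.Int.ofStr? lote with
  | none => rfl
  | some n => exact pvBody_eq n
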